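-- pv_equiv track=rewrite | github.com/dignomes/stock_api | stock/services/approximate_nearest_neighbors_service.py | __get_filtered_ids
-- ===== SOURCE A (Python) =====
-- from typing import Dict, List, Literal, cast
--
-- def __get_filtered_ids(
--         numbers_of_all_memes: int,
--         memes_id_for_exclude: List[int],
-- ) -> List[int]:
--     return [
--         meme_id
--         for meme_id in range(numbers_of_all_memes)
--         if meme_id not in memes_id_for_exclude
--     ]
-- ===== SOURCE B (Python) =====
-- def __get_filtered_ids(numbers_of_all_memes, memes_id_for_exclude):
--     result = []
--     start = 0
--     for x in sorted(set(memes_id_for_exclude)):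
--         if x >= numbers_of_all_memes:
--             break
--         if x >= start:
--             result.extend(range(start, x))
--             start = x + 1
--     result.extend(range(start, numbers_of_all_memes))
--     return result
-- ===== Notes on version B (the rewrite author's own statement) =====
-- stated objective: faster
-- what changed: Gap-emission: sorts the unique excluded ids once and emits the contiguous runs of ids between consecutive excludes with range-extends, eliminating any per-id membership test.
import Mathlib
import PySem

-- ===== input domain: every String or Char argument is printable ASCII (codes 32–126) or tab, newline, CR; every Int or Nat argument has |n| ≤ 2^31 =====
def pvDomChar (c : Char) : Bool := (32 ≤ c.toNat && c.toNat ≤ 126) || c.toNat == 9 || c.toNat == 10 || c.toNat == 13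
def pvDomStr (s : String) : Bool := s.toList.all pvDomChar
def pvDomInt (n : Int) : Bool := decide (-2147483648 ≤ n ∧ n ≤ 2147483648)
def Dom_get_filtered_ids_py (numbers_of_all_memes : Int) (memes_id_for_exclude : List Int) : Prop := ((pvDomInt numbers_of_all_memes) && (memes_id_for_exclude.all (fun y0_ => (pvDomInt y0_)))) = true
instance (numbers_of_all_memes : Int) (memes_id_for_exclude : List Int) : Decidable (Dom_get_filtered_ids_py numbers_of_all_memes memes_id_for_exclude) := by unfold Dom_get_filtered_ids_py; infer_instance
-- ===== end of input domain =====

-- B replaces A's per-id membership scan by gap emission: it sorts the unique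
-- excluded ids once and extends the result with the runs of ids lying between
-- consecutive excludes.

-- ===== PORT A =====
-- [m for m in range(n) if m not in exclude]
def get_filtered_ids_py (numbers_of_all_memes : Int) (memes_id_for_exclude : List Int) : List Int :=
  (PySem.List.pyRange 0 numbers_of_all_memes 1).filter
    (fun meme_id => !(memes_id_for_exclude.contains meme_id))

-- ===== PORT B =====
-- the for-loop over sorted(set(exclude)) with 'break', state (result, start)
def gapLoop (n : Int) : List Int → Int → List Int → List Int
  | [], start, result => result ++ PySem.List.pyRange start n 1
  | x :: t, start, result =>
      if x ≥ n then result ++ PySem.List.pyRange start n 1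
      else if x ≥ start then gapLoop n t (x + 1) (result ++ PySem.List.pyRange start x 1)
      else gapLoop n t start result

def get_filtered_ids_py_alt (numbers_of_all_memes : Int) (memes_id_for_exclude : List Int) : List Int :=
  gapLoop numbers_of_all_memes
    (PySem.List.sorted (PySem.Set.ofList memes_id_for_exclude) (fun x => x) false) 0 []

-- ===== PRECONDITION & SPEC =====
def Spec_get_filtered_ids_py (numbers_of_all_memes : Int) (memes_id_for_exclude : List Int) (out : List Int) : Prop := out = get_filtered_ids_py_alt numbers_of_all_memes memes_id_for_exclude
instance (numbers_of_all_memes : Int) (memes_id_for_exclude : List Int) (out : List Int) : Decidable (Spec_get_filtered_ids_py numbers_of_all_memes memes_id_for_exclude out) := by unfold Spec_get_filtered_ids_py; infer_instance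

-- ===== CLAIM =====
def Claim_equal_get_filtered_ids_py : Prop := ∀ (numbers_of_all_memes : Int) (memes_id_for_exclude : List Int), Dom_get_filtered_ids_py numbers_of_all_memes memes_id_for_exclude → Spec_get_filtered_ids_py numbers_of_all_memes memes_id_for_exclude (get_filtered_ids_py numbers_of_all_memes memes_id_for_exclude)

-- ===== LEMMAS AND PROOFS =====

-- The loop invariant: on a strictly increasing exclude list l, gapLoop emits
-- exactly the acc followed by the filtered range from start.
theorem gapLoop_eq_filter (n : Int) (l : List Int) :
    ∀ (start : Int) (acc : List Int), l.Pairwise (fun a b => a < b) →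
      gapLoop n l start acc
        = acc ++ (PySem.List.pyRange start n 1).filter (fun m => !(l.contains m)) := by
  induction l with
  | nil =>
      intro start acc _
      simp [gapLoop]
  | cons x t ih =>
      intro start acc hp
      have hxt : ∀ y ∈ t, x < y := by
        intro y hy; exact (List.pairwise_cons.mp hp).1 y hy
      have hpt : t.Pairwise (fun a b => a < b) := (List.pairwise_cons.mp hp).2
      by_cases hxn : x ≥ n
      · -- break: no element of x::t occurs in range start n
        have h1 : gapLoop n (x :: t) start acc = acc ++ PySem.List.pyRange start n 1 := by
          simp only [gapLoop]; rw [if_pos hxn]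
        have h2 : (PySem.List.pyRange start n 1).filter (fun m => !((x :: t).contains m))
            = PySem.List.pyRange start n 1 := by
          rw [List.filter_eq_self]
          intro m hm
          have hmn : m < n := (PySem.List.mem_pyRange_one.mp hm).2
          have hmx : m ≠ x := by omega
          have hmt : m ∉ t := fun h => absurd (hxt m h) (by omega)
          simp [hmx, hmt]
        rw [h1, h2]
      · replace hxn : x < n := lt_of_not_ge hxn
        by_cases hxs : x ≥ start
        · -- emit range start x, continue from x+1
          have h1 : gapLoop n (x :: t) start acc
              = gapLoop n t (x + 1) (acc ++ PySem.List.pyRange start x 1) := by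
            simp only [gapLoop]; rw [if_neg (by omega), if_pos hxs]
          rw [h1, ih (x + 1) _ hpt, List.append_assoc]
          congr 1
          have hsplit : PySem.List.pyRange start n 1
              = PySem.List.pyRange start x 1 ++ PySem.List.pyRange x n 1 :=
            PySem.List.pyRange_one_append start x n hxs (le_of_lt hxn)
          have hcons : PySem.List.pyRange x n 1 = x :: PySem.List.pyRange (x + 1) n 1 :=
            PySem.List.pyRange_one_cons hxn
          rw [hsplit, hcons, List.filter_append]
          have hlow : (PySem.List.pyRange start x 1).filter (fun m => !((x :: t).contains m))
              = PySem.List.pyRange start x 1 := by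
            rw [List.filter_eq_self]
            intro m hm
            have hmx2 : m < x := (PySem.List.mem_pyRange_one.mp hm).2
            have hmx : m ≠ x := by omega
            have hmt : m ∉ t := fun h => absurd (hxt m h) (by omega)
            simp [hmx, hmt]
          have hhigh : (x :: PySem.List.pyRange (x + 1) n 1).filter
                (fun m => !((x :: t).contains m))
              = (PySem.List.pyRange (x + 1) n 1).filter (fun m => !(t.contains m)) := by
            rw [List.filter_cons,
              if_neg (by simp : ¬ (!((x :: t).contains x)) = true)]
            apply List.filter_congr
            intro m hm
            have hmx : m ≠ x := by
              have := (PySem.List.mem_pyRange_one.mp hm).1; omega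
            simp [hmx]
          rw [hlow, hhigh]
        · -- x below start: it never occurs in the range
          replace hxs : x < start := lt_of_not_ge hxs
          have h1 : gapLoop n (x :: t) start acc = gapLoop n t start acc := by
            simp only [gapLoop]; rw [if_neg (by omega), if_neg (by omega)]
          rw [h1, ih start acc hpt]
          congr 1
          apply List.filter_congr
          intro m hm
          have hmx : m ≠ x := by
            have := (PySem.List.mem_pyRange_one.mp hm).1; omega
          simp [hmx]

-- ===== VERDICT =====
theorem get_filtered_ids_py_spec : Claim_equal_get_filtered_ids_py := by
  intro n ex _
  unfold Spec_get_filtered_ids_py get_filtered_ids_py_alt get_filtered_ids_py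
  rw [gapLoop_eq_filter n _ 0 []
      (PySem.List.sorted_ofList_pairwise_lt ex)]
  simp only [List.nil_append]
  apply List.filter_congr
  intro m _
  have : m ∈ PySem.List.sorted (PySem.Set.ofList ex) (fun x => x) false ↔ m ∈ ex := by
    rw [PySem.List.mem_sorted, PySem.Set.mem_ofList]
  by_cases hm : m ∈ ex <;> simp [this, hm]
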